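-- pv_equiv track=rewrite | github.com/minnesotanlp/the-amazing-agent-race | src/trail/wiki_graph.py | _is_wikipedia_article_url
-- ===== SOURCE A (Python) =====
-- _WIKI_PREFIX = "https://en.wikipedia.org/wiki/"
--
-- _EXCLUDED_NAMESPACES = {
--     "Special:",
--     "File:",
--     "Category:",
--     "Talk:",
--     "Help:",
--     "Wikipedia:",
--     "Template:",
--     "Portal:",
--     "Module:",
--     "Draft:",
--     "User:",
--     "MediaWiki:",
-- }
--
-- def _is_wikipedia_article_url(url: str) -> bool:
--     """Check if a URL points to an English Wikipedia article (not a namespace page)."""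
--     if not url.startswith(_WIKI_PREFIX):
--         return False
--     title = url[len(_WIKI_PREFIX) :]
--     for ns in _EXCLUDED_NAMESPACES:
--         if title.startswith(ns):
--             return False
--     return True
-- ===== SOURCE B (Python) =====
-- _WIKI_PREFIX = "https://en.wikipedia.org/wiki/"
--
-- _EXCLUDED_NAMESPACES = {
--     "Special:",
--     "File:",
--     "Category:",
--     "Talk:",
--     "Help:",
--     "Wikipedia:",
--     "Template:",
--     "Portal:",
--     "Module:",
--     "Draft:",
--     "User:",
--     "MediaWiki:",
-- }
--
-- def _is_wikipedia_article_url(url: str) -> bool: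
--     """Check if a URL points to an English Wikipedia article (not a namespace page)."""
--     if not url.startswith(_WIKI_PREFIX):
--         return False
--     title = url[len(_WIKI_PREFIX):]
--     idx = title.find(':')
--     if idx == -1:
--         return True
--     return title[:idx + 1] not in _EXCLUDED_NAMESPACES
-- ===== Notes on version B (the rewrite author's own statement) =====
-- stated objective: alternative
-- what changed: Instead of scanning all 12 excluded namespaces with startswith, B extracts the title's prefix up to and including the first colon in one find and does a single set-membership test.
import Mathlib
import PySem

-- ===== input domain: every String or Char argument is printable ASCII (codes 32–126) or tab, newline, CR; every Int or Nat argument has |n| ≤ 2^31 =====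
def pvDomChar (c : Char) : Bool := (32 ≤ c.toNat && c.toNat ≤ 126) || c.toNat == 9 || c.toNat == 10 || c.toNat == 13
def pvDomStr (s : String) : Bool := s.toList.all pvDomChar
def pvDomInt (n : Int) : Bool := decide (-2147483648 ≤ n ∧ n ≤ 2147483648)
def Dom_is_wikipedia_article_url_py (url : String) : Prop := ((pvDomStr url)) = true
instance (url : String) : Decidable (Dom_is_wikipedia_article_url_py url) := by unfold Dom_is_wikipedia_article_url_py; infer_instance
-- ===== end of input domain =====

-- B replaces A's scan over 12 namespace prefixes by one first-colon find plus a single set-membership test (alternative decomposition, same cost class).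


-- ===== PORT A =====
def pvWikiPrefix : List Char := "https://en.wikipedia.org/wiki/".toList

def pvExcludedNamespaces : List (List Char) :=
  ["Special:".toList, "File:".toList, "Category:".toList, "Talk:".toList,
   "Help:".toList, "Wikipedia:".toList, "Template:".toList, "Portal:".toList,
   "Module:".toList, "Draft:".toList, "User:".toList, "MediaWiki:".toList]

-- literal port of A: prefix guard, slice, then the for-loop with early return (= any)
def is_wikipedia_article_url_py (url : String) : Bool :=
  if !(PySem.Chars.startswith url.toList pvWikiPrefix) then false
  else
    let title := PySem.List.slice url.toList (some (pvWikiPrefix.length : Int)) none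
    if pvExcludedNamespaces.any (fun ns => PySem.Chars.startswith title ns) then false
    else true

-- ===== PORT B =====
-- literal port of B: prefix guard, slice, find first colon, one membership test on the inclusive colon-prefix
def is_wikipedia_article_url_py_alt (url : String) : Bool :=
  if !(PySem.Chars.startswith url.toList pvWikiPrefix) then false
  else
    let title := PySem.List.slice url.toList (some (pvWikiPrefix.length : Int)) none
    let idx := PySem.Chars.find title [':']
    if idx == -1 then true
    else !(pvExcludedNamespaces.contains (PySem.List.slice title none (some (idx + 1))))

-- ===== PRECONDITION & SPEC =====
def Spec_is_wikipedia_article_url_py (url : String) (out : Bool) : Prop := out = is_wikipedia_article_url_py_alt url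
instance (url : String) (out : Bool) : Decidable (Spec_is_wikipedia_article_url_py url out) := by unfold Spec_is_wikipedia_article_url_py; infer_instance

-- ===== CLAIM (what is proved, stated in full; the proofs are below) =====
def Claim_equal_is_wikipedia_article_url_py : Prop := ∀ (url : String), Dom_is_wikipedia_article_url_py url → Spec_is_wikipedia_article_url_py url (is_wikipedia_article_url_py url)

-- ===== LEMMAS AND PROOFS =====

lemma singleton_prefix_drop {t : List Char} {c : Char} {i : Nat} :
    [c] <+: t.drop i ↔ t[i]? = some c := by
  rw [← List.head?_drop]
  cases t.drop i with
  | nil => simp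
  | cons x xs =>
    constructor
    · rintro ⟨r, hr⟩; simp at hr; simp [hr.1]
    · intro h; simp at h; exact ⟨xs, by simp [h]⟩

-- each excluded namespace is (dropLast) ++ [':'] with no earlier colon
lemma pvExcluded_shape : ∀ ns ∈ pvExcludedNamespaces,
    ns.dropLast ++ [':'] = ns ∧ ':' ∉ ns.dropLast := by decide

lemma find_of_colon_split {t w r : List Char} (hw : ':' ∉ w) (ht : t = w ++ ':' :: r) :
    PySem.Chars.find t [':'] = (w.length : Int) := by
  have hinf : PySem.Chars.isIn [':'] t = true := by
    rw [← PySem.Chars.exists_prefix_drop_iff_isIn]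
    exact ⟨w.length, by simp [ht]⟩
  have hnn : 0 ≤ PySem.Chars.find t [':'] :=
    (PySem.Chars.find_nonneg_iff t [':']).mpr ((PySem.Chars.isIn_iff_infix [':'] t).mp hinf)
  obtain ⟨h1, h2⟩ := PySem.Chars.find_spec hnn
  set k := (PySem.Chars.find t [':']).toNat with hk
  have hget : t[k]? = some ':' := singleton_prefix_drop.mp h1
  have hklt : ¬ k < w.length := by
    intro hlt
    have : t[k]? = some (w[k]'hlt) := by
      rw [ht, List.getElem?_append_left hlt]
      simp
    rw [this] at hget
    have heq : w[k]'hlt = ':' := Option.some_inj.mp hget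
    exact hw (heq ▸ w.getElem_mem hlt)
  have hkgt : ¬ w.length < k := by
    intro hlt
    exact h2 w.length hlt (singleton_prefix_drop.mpr (by rw [ht]; simp))
  have : k = w.length := by omega
  omega

lemma main_iff (t : List Char) :
    (pvExcludedNamespaces.any fun ns => PySem.Chars.startswith t ns) = true ↔
    (PySem.Chars.find t [':'] ≠ -1 ∧
     pvExcludedNamespaces.contains
       (PySem.List.slice t none (some (PySem.Chars.find t [':'] + 1))) = true) := by
  constructor
  · intro hany
    rw [List.any_eq_true] at hany
    obtain ⟨ns, hmem, hsw⟩ := hany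
    obtain ⟨hns, hw⟩ := pvExcluded_shape ns hmem
    obtain ⟨r, hr⟩ := (PySem.Chars.startswith_iff t ns).mp hsw
    have ht : t = ns.dropLast ++ ':' :: r := by rw [← hr, ← hns]; simp
    have hfind := find_of_colon_split hw ht
    refine ⟨by rw [hfind]; omega, ?_⟩
    have hcast : (ns.dropLast.length : Int) + 1 = ((ns.dropLast.length + 1 : Nat) : Int) := by
      push_cast; ring
    rw [hfind, hcast, PySem.List.slice_to_natCast]
    have htake : t.take (ns.dropLast.length + 1) = ns := by
      conv_lhs => rw [ht]
      rw [List.take_append, List.take_of_length_le (Nat.le_succ _), Nat.add_sub_cancel_left]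
      simpa using hns
    rw [htake]
    simpa using hmem
  · rintro ⟨hne, hcont⟩
    have hnn : 0 ≤ PySem.Chars.find t [':'] := by
      have := PySem.Chars.neg_one_le_find t [':']
      omega
    rw [PySem.List.slice_to t (b := PySem.Chars.find t [':'] + 1) (by omega)] at hcont
    rw [List.any_eq_true]
    refine ⟨_, by simpa using hcont, ?_⟩
    exact (PySem.Chars.startswith_iff t _).mpr (List.take_prefix _ t)

-- ===== VERDICT (by name: the statement is the Claim_ definition above) =====
theorem is_wikipedia_article_url_py_spec : Claim_equal_is_wikipedia_article_url_py := by
  intro url _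
  unfold Spec_is_wikipedia_article_url_py is_wikipedia_article_url_py is_wikipedia_article_url_py_alt
  cases hsw : PySem.Chars.startswith url.toList pvWikiPrefix with
  | false => simp
  | true =>
    simp only [Bool.not_true, Bool.false_eq_true, if_false]
    set t := PySem.List.slice url.toList (some (pvWikiPrefix.length : Int)) none with htdef
    by_cases hany : (pvExcludedNamespaces.any fun ns => PySem.Chars.startswith t ns) = true
    · obtain ⟨hne, hcont⟩ := (main_iff t).mp hany
      have hbeq : (PySem.Chars.find t [':'] == -1) = false := by
        simpa using hne
      rw [hany, hcont, hbeq]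
      simp
    · rw [Bool.not_eq_true] at hany
      by_cases hf : PySem.Chars.find t [':'] = -1
      · rw [hany, hf]
        simp
      · have hbeq : (PySem.Chars.find t [':'] == -1) = false := by
          simpa using hf
        have hcont : pvExcludedNamespaces.contains
            (PySem.List.slice t none (some (PySem.Chars.find t [':'] + 1))) = false := by
          by_contra h
          rw [Bool.not_eq_false] at h
          rw [(main_iff t).mpr ⟨hf, h⟩] at hany
          cases hany
        rw [hany, hbeq, hcont]
        simp
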